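-- pv_equiv track=rewrite | github.com/mberrien-fitzsimons/your_personal_cookbook_webapp | models.py | ingredient_recipe_matcher
-- ===== SOURCE A (Python) =====
-- from collections import Counter
--
-- def ingredient_recipe_matcher(ingredients_list, similar_list, recipe_title):
--     matching_recipes = []
--     matching_ingredients = []
--     return_recipes = []
--
--     for element in similar_list:
--         if any(element in s for s in ingredients_list):
--             matching_recipes.append(recipe_title)
--     count_recipe_dict = dict(Counter(matching_recipes))
--
--     for key, val in count_recipe_dict.items():
--         return_recipes.append(key)
--
--     return return_recipes
-- ===== SOURCE B (Python) =====
-- def ingredient_recipe_matcher(ingredients_list, similar_list, recipe_title):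
--     if any(element in s for element in similar_list for s in ingredients_list):
--         return [recipe_title]
--     return []
-- ===== Notes on version B (the rewrite author's own statement) =====
-- stated objective: simpler
-- what changed: Replaced A's four-phase pipeline (build a list of repeated titles, Counter it, convert to dict, re-extract the keys) with a single any() over the element/ingredient pairs returning [recipe_title] on a hit and [] otherwise, maintaining no intermediate lists or dicts.
import Mathlib
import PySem

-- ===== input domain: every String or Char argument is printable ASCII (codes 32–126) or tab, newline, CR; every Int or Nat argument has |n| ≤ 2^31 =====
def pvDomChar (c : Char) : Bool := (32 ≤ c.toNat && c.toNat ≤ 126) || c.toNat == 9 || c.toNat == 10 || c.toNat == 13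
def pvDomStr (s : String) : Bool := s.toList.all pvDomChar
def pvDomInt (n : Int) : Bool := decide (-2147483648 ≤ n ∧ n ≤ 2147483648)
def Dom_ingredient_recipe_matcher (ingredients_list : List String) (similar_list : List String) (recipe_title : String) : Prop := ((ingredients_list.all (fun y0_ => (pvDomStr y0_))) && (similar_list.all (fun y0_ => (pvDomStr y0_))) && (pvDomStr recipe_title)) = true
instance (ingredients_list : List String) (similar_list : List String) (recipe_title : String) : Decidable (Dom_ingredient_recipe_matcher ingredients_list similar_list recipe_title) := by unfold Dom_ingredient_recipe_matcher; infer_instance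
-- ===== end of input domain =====

-- ===== PORT A =====
-- Literal transliteration of A: build matching_recipes, Counter -> dict, re-extract keys.
def ingredient_recipe_matcher (ingredients_list : List String) (similar_list : List String) (recipe_title : String) : List String :=
  let matching_recipes : List String :=
    similar_list.foldl (fun acc element =>
      if ingredients_list.any (fun s => PySem.Str.isIn element s) then acc ++ [recipe_title]
      else acc) []
  let count_recipe_dict : PySem.Dict String Int := PySem.Dict.counter matching_recipes
  let return_recipes : List String :=
    count_recipe_dict.items.foldl (fun acc kv => acc ++ [kv.1]) []
  return_recipes

-- ===== PORT B =====
-- B: one boolean scan, no intermediate state; [recipe_title] on a hit else [].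
def ingredient_recipe_matcher_alt (ingredients_list : List String) (similar_list : List String) (recipe_title : String) : List String :=
  if similar_list.any (fun element => ingredients_list.any (fun s => PySem.Str.isIn element s)) then
    [recipe_title]
  else []

-- ===== PRECONDITION & SPEC =====
def Spec_ingredient_recipe_matcher (ingredients_list : List String) (similar_list : List String) (recipe_title : String) (out : List String) : Prop := out = ingredient_recipe_matcher_alt ingredients_list similar_list recipe_title
instance (ingredients_list : List String) (similar_list : List String) (recipe_title : String) (out : List String) : Decidable (Spec_ingredient_recipe_matcher ingredients_list similar_list recipe_title out) := by unfold Spec_ingredient_recipe_matcher; infer_instance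

-- ===== CLAIM (what is proved, stated in full; the proofs are below) =====
def Claim_equal_ingredient_recipe_matcher : Prop := ∀ (ingredients_list : List String) (similar_list : List String) (recipe_title : String), Dom_ingredient_recipe_matcher ingredients_list similar_list recipe_title → Spec_ingredient_recipe_matcher ingredients_list similar_list recipe_title (ingredient_recipe_matcher ingredients_list similar_list recipe_title)

-- ===== LEMMAS AND PROOFS =====

-- set() of a constant-valued map is empty or the singleton
theorem pv_ofList_map_const {t : String} (xs : List String) :
    PySem.Set.ofList (xs.map (fun _ => t)) = if xs = [] then [] else [t] := by
  induction xs with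
  | nil => simp [PySem.Set.ofList_nil]
  | cons x xs ih =>
    simp only [List.map_cons, PySem.Set.ofList_cons, ih]
    by_cases h : xs = [] <;>
      simp [h, PySem.Set.discard]

theorem ingredient_recipe_matcher_eq (ingredients_list : List String)
    (similar_list : List String) (recipe_title : String) :
    ingredient_recipe_matcher ingredients_list similar_list recipe_title =
      ingredient_recipe_matcher_alt ingredients_list similar_list recipe_title := by
  unfold ingredient_recipe_matcher ingredient_recipe_matcher_alt
  simp only [PySem.List.foldl_append_if, PySem.List.foldl_append_singleton_eq_map,
    List.nil_append]
  have hk : ∀ (d : PySem.Dict String Int), d.items.map (fun kv => kv.1) = d.keys := fun d => rfl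
  rw [hk, PySem.Dict.keys_counter, pv_ofList_map_const]
  by_cases hany : (similar_list.any fun element => ingredients_list.any fun s => PySem.Str.isIn element s) = true
  · rcases List.any_eq_true.mp hany with ⟨a, ha, hpa⟩
    have hne : List.filter (fun element => ingredients_list.any fun s => PySem.Str.isIn element s) similar_list ≠ [] := by
      intro hnil
      have hmem : a ∈ List.filter (fun element => ingredients_list.any fun s => PySem.Str.isIn element s) similar_list := List.mem_filter.mpr ⟨ha, hpa⟩
      rw [hnil] at hmem
      exact (List.not_mem_nil).elim hmem
    rw [if_neg hne, if_pos hany]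
  · have hf : List.filter (fun element => ingredients_list.any fun s => PySem.Str.isIn element s) similar_list = [] :=
      List.filter_eq_nil_iff.mpr (fun a ha hpa =>
        hany (List.any_eq_true.mpr ⟨a, ha, hpa⟩))
    rw [if_pos hf, if_neg hany]

-- ===== VERDICT (by name: the statement is the Claim_ definition above) =====
theorem ingredient_recipe_matcher_spec : Claim_equal_ingredient_recipe_matcher := by
  intro il sl t _
  unfold Spec_ingredient_recipe_matcher
  exact ingredient_recipe_matcher_eq il sl t
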